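-- pv_equiv track=rewrite | github.com/pgirolami/ifrs-expert | src/extraction/html.py | _build_toc_anchor_lineage_ids
-- ===== SOURCE A (Python) =====
-- def _build_toc_anchor_lineage_ids(anchor_id: str) -> list[str]:
--     parts = anchor_id.split("-")
--     lineage_ids: list[str] = []
--     current = parts[0]
--     lineage_ids.append(current)
--     for part in parts[1:]:
--         current = f"{current}-{part}"
--         lineage_ids.append(current)
--     return lineage_ids
-- ===== SOURCE B (Python) =====
-- def _build_toc_anchor_lineage_ids(anchor_id: str) -> list[str]:
--     dash_positions = [i for i, ch in enumerate(anchor_id) if ch == "-"]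
--     return [anchor_id[:i] for i in dash_positions] + [anchor_id]
-- ===== Notes on version B (the rewrite author's own statement) =====
-- stated objective: alternative
-- what changed: B replaces the split-then-accumulate loop (growing a running string across split parts) by one scan collecting the dash positions and producing each lineage id as a slice anchor_id[:i] of the original string, plus the full string.
import Mathlib
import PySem

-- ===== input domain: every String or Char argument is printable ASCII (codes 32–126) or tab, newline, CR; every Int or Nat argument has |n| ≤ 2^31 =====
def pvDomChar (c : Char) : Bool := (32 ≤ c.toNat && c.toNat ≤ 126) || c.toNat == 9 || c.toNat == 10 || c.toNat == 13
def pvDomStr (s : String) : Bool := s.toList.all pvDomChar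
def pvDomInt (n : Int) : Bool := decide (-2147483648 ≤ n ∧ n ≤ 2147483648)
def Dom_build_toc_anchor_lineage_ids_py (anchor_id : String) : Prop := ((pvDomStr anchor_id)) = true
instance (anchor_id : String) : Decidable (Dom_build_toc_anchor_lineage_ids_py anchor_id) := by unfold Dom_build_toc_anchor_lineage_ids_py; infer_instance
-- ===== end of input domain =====

-- B rebuilds the lineage ids by slicing the original string at its dash positions instead of
-- accumulating a running string over split parts (alternative decomposition, same cost).


-- ===== PORT A =====
-- Port of A at the List Char level (PySem.Chars.splitOn = str.split with nonempty sep); the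
-- '[] => []' branch is unreachable since split never returns an empty list (Python parts[0]).
def build_toc_anchor_lineage_ids_py (anchor_id : String) : List String :=
  match PySem.Chars.splitOn anchor_id.toList ['-'] with
  | [] => []
  | p :: ps =>
    ((ps.foldl (fun (st : List (List Char) × List Char) part =>
        (st.1 ++ [st.2 ++ '-' :: part], st.2 ++ '-' :: part)) ([p], p)).1).map String.ofList

-- ===== PORT B =====
-- Port of B: indices of '-' collected from one enumerate pass, each prefix taken by slicing.
def build_toc_anchor_lineage_ids_py_alt (anchor_id : String) : List String :=
  let cs := anchor_id.toList
  let dashPositions := (PySem.List.enumerate cs 0).filterMap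
      (fun ic => if ic.2 = '-' then some ic.1 else none)
  (dashPositions.map (fun i => PySem.List.slice cs none (some i)) ++ [cs]).map String.ofList

-- ===== PRECONDITION & SPEC =====
def Spec_build_toc_anchor_lineage_ids_py (anchor_id : String) (out : List String) : Prop := out = build_toc_anchor_lineage_ids_py_alt anchor_id
instance (anchor_id : String) (out : List String) : Decidable (Spec_build_toc_anchor_lineage_ids_py anchor_id out) := by unfold Spec_build_toc_anchor_lineage_ids_py; infer_instance

-- ===== CLAIM (what is proved, stated in full; the proofs are below) =====
def Claim_equal_build_toc_anchor_lineage_ids_py : Prop := ∀ (anchor_id : String), Dom_build_toc_anchor_lineage_ids_py anchor_id → Spec_build_toc_anchor_lineage_ids_py anchor_id (build_toc_anchor_lineage_ids_py anchor_id)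

-- ===== LEMMAS AND PROOFS =====

-- canonical form: the list of cumulative dash-prefixes of cs (each mapped '-'-split piece)
def prefP : List Char → List (List Char)
  | [] => [[]]
  | c :: r => if c = '-' then [] :: (prefP r).map (c :: ·) else (prefP r).map (c :: ·)

-- split on '-' written as plain structural recursion: (head piece, remaining pieces)
def mySplit : List Char → List Char × List (List Char)
  | [] => ([], [])
  | c :: r =>
    let ht := mySplit r
    if c = '-' then ([], ht.1 :: ht.2) else (c :: ht.1, ht.2)

lemma splitOn_go_eq (l : List Char) : ∀ (fuel : Nat) (cur : List Char) (acc : List (List Char)),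
    l.length ≤ fuel →
    PySem.Chars.splitOn.go ['-'] fuel l cur acc
      = acc.reverse ++ (cur.reverse ++ (mySplit l).1) :: (mySplit l).2 := by
  induction l with
  | nil =>
    intro fuel cur acc _
    cases fuel <;> simp [PySem.Chars.splitOn.go, mySplit]
  | cons c r ih =>
    intro fuel cur acc h
    cases fuel with
    | zero => simp at h
    | succ f =>
      by_cases hc : c = '-'
      · subst hc
        have hpre : List.isPrefixOf ['-'] ('-' :: r) = true := by simp [List.isPrefixOf]
        simp only [PySem.Chars.splitOn.go, hpre, if_true, List.length_cons, List.length_nil,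
          List.drop_succ_cons, List.drop_zero] at *
        rw [ih f [] (cur.reverse :: acc) (by omega)]
        simp only [mySplit, if_true]
        simp
      · have hpre : List.isPrefixOf ['-'] (c :: r) = false := by
          simp only [List.isPrefixOf, Bool.and_eq_false_iff, beq_eq_false_iff_ne, ne_eq]
          exact Or.inl fun h => hc h.symm
        simp only [PySem.Chars.splitOn.go, hpre, Bool.false_eq_true, if_false,
          List.length_cons] at *
        rw [ih f (c :: cur) acc (by omega)]
        simp [mySplit, hc]

lemma splitOn_eq (l : List Char) :
    PySem.Chars.splitOn l ['-'] = (mySplit l).1 :: (mySplit l).2 := by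
  have := splitOn_go_eq l (l.length + 1) [] [] (by omega)
  simpa [PySem.Chars.splitOn] using this

-- A's loop, written as plain recursion on the remaining parts
def tailcum (cur : List Char) : List (List Char) → List (List Char)
  | [] => []
  | q :: qs => (cur ++ '-' :: q) :: tailcum (cur ++ '-' :: q) qs

lemma fold_eq (ps : List (List Char)) : ∀ (acc : List (List Char)) (cur : List Char),
    (ps.foldl (fun (st : List (List Char) × List Char) part =>
        (st.1 ++ [st.2 ++ '-' :: part], st.2 ++ '-' :: part)) (acc, cur)).1
      = acc ++ tailcum cur ps := by
  induction ps with
  | nil => intro acc cur; simp [tailcum]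
  | cons q qs ih =>
    intro acc cur
    simp only [List.foldl_cons, tailcum]
    rw [ih]
    simp

lemma tailcum_cons (ps : List (List Char)) : ∀ (c : Char) (p : List Char),
    tailcum (c :: p) ps = (tailcum p ps).map (c :: ·) := by
  induction ps with
  | nil => intro c p; simp [tailcum]
  | cons q qs ih =>
    intro c p
    have : (c :: p) ++ '-' :: q = c :: (p ++ '-' :: q) := by simp
    simp only [tailcum, this, ih, List.map_cons]

lemma A_eq_prefP (l : List Char) :
    (mySplit l).1 :: tailcum (mySplit l).1 (mySplit l).2 = prefP l := by
  induction l with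
  | nil => simp [mySplit, prefP, tailcum]
  | cons c r ih =>
    by_cases hc : c = '-'
    · subst hc
      simp only [mySplit, prefP, if_true]
      rw [← ih]
      simp [tailcum, tailcum_cons]
    · simp only [mySplit, prefP, hc, if_false]
      rw [← ih]
      simp [tailcum_cons]

-- B's dash positions as Nats, structurally
def natpos : List Char → List Nat
  | [] => []
  | c :: r => if c = '-' then 0 :: (natpos r).map (· + 1) else (natpos r).map (· + 1)

lemma enum_filterMap (l : List Char) : ∀ (s : Int),
    (PySem.List.enumerate l s).filterMap (fun ic => if ic.2 = '-' then some ic.1 else none)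
      = (natpos l).map (fun (n : Nat) => s + (n : Int)) := by
  induction l with
  | nil => intro s; simp [PySem.List.enumerate_nil, natpos]
  | cons c r ih =>
    intro s
    rw [PySem.List.enumerate_cons, List.filterMap_cons]
    by_cases hc : c = '-'
    · simp only [hc, if_true, natpos, ih, List.map_cons, List.map_map]
      rw [show s + ((0 : Nat) : Int) = s by simp]
      refine congrArg (List.cons s) ?_
      refine List.map_congr_left (fun n _ => ?_)
      show s + 1 + (n : Int) = s + ((n + 1 : Nat) : Int)
      push_cast; ring
    · simp only [hc, if_false, natpos, ih, List.map_map]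
      refine List.map_congr_left (fun n _ => ?_)
      show s + 1 + (n : Int) = s + ((n + 1 : Nat) : Int)
      push_cast; ring

lemma B_eq_take (l : List Char) :
    ((PySem.List.enumerate l 0).filterMap (fun ic => if ic.2 = '-' then some ic.1 else none)).map
        (fun i => PySem.List.slice l none (some i))
      = (natpos l).map (fun n => l.take n) := by
  rw [enum_filterMap, List.map_map]
  refine List.map_congr_left (fun n _ => ?_)
  show PySem.List.slice l none (some (0 + (n : Int))) = l.take n
  rw [zero_add]
  exact PySem.List.slice_to_natCast l n

lemma B_eq_prefP (l : List Char) :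
    (natpos l).map (fun n => l.take n) ++ [l] = prefP l := by
  induction l with
  | nil => simp [natpos, prefP]
  | cons c r ih =>
    by_cases hc : c = '-'
    · subst hc
      simp only [natpos, prefP, if_true]
      rw [← ih]
      simp [List.map_map, Function.comp]
    · simp only [natpos, prefP, hc, if_false]
      rw [← ih]
      simp [List.map_map, Function.comp]

lemma ports_agree (anchor_id : String) :
    build_toc_anchor_lineage_ids_py anchor_id = build_toc_anchor_lineage_ids_py_alt anchor_id := by
  unfold build_toc_anchor_lineage_ids_py build_toc_anchor_lineage_ids_py_alt
  rw [splitOn_eq]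
  simp only
  rw [fold_eq, B_eq_take]
  rw [show ∀ (h : List Char) (t : List (List Char)), [h] ++ tailcum h t = h :: tailcum h t from fun _ _ => rfl]
  rw [A_eq_prefP, B_eq_prefP]

-- ===== VERDICT (by name: the statement is the Claim_ definition above) =====
theorem build_toc_anchor_lineage_ids_py_spec : Claim_equal_build_toc_anchor_lineage_ids_py := by
  intro anchor_id _
  unfold Spec_build_toc_anchor_lineage_ids_py
  exact ports_agree anchor_id
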